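-- pv_equiv track=rewrite | github.com/psligti/ash-hawk | ash_hawk/thin_runtime/agent_text.py | _build_memory_sections
-- ===== SOURCE A (Python) =====
-- from typing import Any
--
-- def _normalize_memory_items(value: Any) -> list[str]:
--     if isinstance(value, list):
--         return [str(item).strip() for item in value if str(item).strip()]
--     if isinstance(value, str) and value.strip():
--         return [value.strip()]
--     return []
--
-- def _build_memory_sections(memory_snapshot: dict[str, dict[str, Any]]) -> list[str]:
--     semantic_memory = memory_snapshot.get("semantic_memory", {})
--     personal_memory = memory_snapshot.get("personal_memory", {})
--     episodic_memory = memory_snapshot.get("episodic_memory", {})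
--
--     semantic_rules = _normalize_memory_items(semantic_memory.get("rules"))
--     semantic_boosts = _normalize_memory_items(semantic_memory.get("boosts"))
--     semantic_penalties = _normalize_memory_items(semantic_memory.get("penalties"))
--     personal_preferences = _normalize_memory_items(personal_memory.get("preferences"))
--     episodic_entries = _normalize_memory_items(episodic_memory.get("episodes"))
--
--     if not any(
--         [
--             semantic_rules,
--             semantic_boosts,
--             semantic_penalties,
--             personal_preferences,
--             episodic_entries,
--         ]
--     ):
--         return []
--
--     sections = ["Memory guidance:"]
--     if personal_preferences:
--         sections.append("User preferences:")
--         sections.extend(f"- {item}" for item in personal_preferences[:5])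
--     if semantic_rules:
--         sections.append("Learned rules:")
--         sections.extend(f"- {item}" for item in semantic_rules[:5])
--     if semantic_boosts:
--         sections.append("Behaviors to reinforce:")
--         sections.extend(f"- {item}" for item in semantic_boosts[:5])
--     if semantic_penalties:
--         sections.append("Behaviors to avoid:")
--         sections.extend(f"- {item}" for item in semantic_penalties[:5])
--     if episodic_entries:
--         sections.append("Relevant past episodes:")
--         sections.extend(f"- {item}" for item in episodic_entries[:3])
--     return sections
-- ===== SOURCE B (Python) =====
-- from typing import Any
--
-- def _normalize_memory_items(value: Any) -> list[str]:
--     if isinstance(value, list):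
--         return [str(item).strip() for item in value if str(item).strip()]
--     if isinstance(value, str) and value.strip():
--         return [value.strip()]
--     return []
--
-- def _section(source: dict, key: str, header: str, limit: int, tail: list[str]) -> list[str]:
--     """Prepend one rendered section onto an already-built tail (or return the tail unchanged)."""
--     items = _normalize_memory_items(source.get(key))
--     if not items:
--         return tail
--     return [header] + [f"- {item}" for item in items[:limit]] + tail
--
-- def _build_memory_sections(memory_snapshot: dict[str, dict[str, Any]]) -> list[str]:
--     # Build the body back-to-front by nesting continuation-style section builders;
--     # the any(...) emptiness test collapses into a single check of the built body.
--     semantic_memory = memory_snapshot.get("semantic_memory", {})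
--     personal_memory = memory_snapshot.get("personal_memory", {})
--     episodic_memory = memory_snapshot.get("episodic_memory", {})
--     body = _section(personal_memory, "preferences", "User preferences:", 5,
--            _section(semantic_memory, "rules", "Learned rules:", 5,
--            _section(semantic_memory, "boosts", "Behaviors to reinforce:", 5,
--            _section(semantic_memory, "penalties", "Behaviors to avoid:", 5,
--            _section(episodic_memory, "episodes", "Relevant past episodes:", 3, [])))))
--     return ["Memory guidance:"] + body if body else []
-- ===== Notes on version B (the rewrite author's own statement) =====
-- stated objective: alternative
-- what changed: Instead of mutating one sections list through five if-blocks after an explicit any(...) emptiness test, B builds the body back-to-front by nesting a single continuation-style section builder (_section prepends a rendered section onto an already-built tail), and the emptiness test becomes one check of the built body.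
import Mathlib
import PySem

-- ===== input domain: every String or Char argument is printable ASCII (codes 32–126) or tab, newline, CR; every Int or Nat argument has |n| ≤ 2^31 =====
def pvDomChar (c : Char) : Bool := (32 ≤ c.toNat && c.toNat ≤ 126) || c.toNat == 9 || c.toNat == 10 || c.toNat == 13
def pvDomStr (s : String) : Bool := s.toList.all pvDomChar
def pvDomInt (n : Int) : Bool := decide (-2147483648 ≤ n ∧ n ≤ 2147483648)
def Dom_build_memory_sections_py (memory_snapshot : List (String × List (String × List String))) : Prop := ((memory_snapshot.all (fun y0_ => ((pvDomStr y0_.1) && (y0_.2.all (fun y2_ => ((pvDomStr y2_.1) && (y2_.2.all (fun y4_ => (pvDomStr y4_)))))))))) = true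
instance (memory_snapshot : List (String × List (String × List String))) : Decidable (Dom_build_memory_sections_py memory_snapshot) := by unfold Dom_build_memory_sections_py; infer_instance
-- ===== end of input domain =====

-- B builds the body back-to-front by nesting a continuation-style section builder, folding
-- A's explicit any(...) emptiness test into one check of the built body (objective: alternative).

-- shared helper: dict.get k (first match in the association list; none = key absent)
def pyDictGet {α : Type} (d : List (String × α)) (k : String) : Option α :=
  (d.find? (fun p => p.1 == k)).map Prod.snd

-- shared helper: _normalize_memory_items (value is a list of strings or absent under the type
-- convention, so only the isinstance(value, list) branch and the final return [] are reachable;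
-- the comprehension is the filterMap below)
def normMem (value : Option (List String)) : List String :=
  match value with
  | some xs => xs.filterMap (fun item =>
      let t := PySem.Str.strip item
      if t = "" then none else some t)
  | none => []

-- ===== PORT A =====
-- items[:5] / items[:3] with a nonnegative literal bound is exactly List.take 5 / take 3
def build_memory_sections_py (memory_snapshot : List (String × List (String × List String))) : List String :=
  let semantic_memory := (pyDictGet memory_snapshot "semantic_memory").getD []
  let personal_memory := (pyDictGet memory_snapshot "personal_memory").getD []
  let episodic_memory := (pyDictGet memory_snapshot "episodic_memory").getD []
  let semantic_rules := normMem (pyDictGet semantic_memory "rules")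
  let semantic_boosts := normMem (pyDictGet semantic_memory "boosts")
  let semantic_penalties := normMem (pyDictGet semantic_memory "penalties")
  let personal_preferences := normMem (pyDictGet personal_memory "preferences")
  let episodic_entries := normMem (pyDictGet episodic_memory "episodes")
  -- if not any([...]): return []
  if semantic_rules = [] ∧ semantic_boosts = [] ∧ semantic_penalties = [] ∧
     personal_preferences = [] ∧ episodic_entries = [] then []
  else
    let sections := ["Memory guidance:"]
    let sections := if personal_preferences ≠ [] then
        sections ++ "User preferences:" :: (personal_preferences.take 5).map (fun item => "- " ++ item)
      else sections
    let sections := if semantic_rules ≠ [] then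
        sections ++ "Learned rules:" :: (semantic_rules.take 5).map (fun item => "- " ++ item)
      else sections
    let sections := if semantic_boosts ≠ [] then
        sections ++ "Behaviors to reinforce:" :: (semantic_boosts.take 5).map (fun item => "- " ++ item)
      else sections
    let sections := if semantic_penalties ≠ [] then
        sections ++ "Behaviors to avoid:" :: (semantic_penalties.take 5).map (fun item => "- " ++ item)
      else sections
    let sections := if episodic_entries ≠ [] then
        sections ++ "Relevant past episodes:" :: (episodic_entries.take 3).map (fun item => "- " ++ item)
      else sections
    sections

-- ===== PORT B =====
-- B helper _section: prepend one rendered section onto an already-built tail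
def sectionB (source : List (String × List String)) (key header : String) (limit : Nat)
    (tail : List String) : List String :=
  let items := normMem (pyDictGet source key)
  if items = [] then tail
  else header :: (items.take limit).map (fun item => "- " ++ item) ++ tail

def build_memory_sections_py_alt (memory_snapshot : List (String × List (String × List String))) : List String :=
  let semantic_memory := (pyDictGet memory_snapshot "semantic_memory").getD []
  let personal_memory := (pyDictGet memory_snapshot "personal_memory").getD []
  let episodic_memory := (pyDictGet memory_snapshot "episodic_memory").getD []
  let body :=
    sectionB personal_memory "preferences" "User preferences:" 5
      (sectionB semantic_memory "rules" "Learned rules:" 5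
        (sectionB semantic_memory "boosts" "Behaviors to reinforce:" 5
          (sectionB semantic_memory "penalties" "Behaviors to avoid:" 5
            (sectionB episodic_memory "episodes" "Relevant past episodes:" 3 []))))
  if body = [] then [] else "Memory guidance:" :: body

-- ===== PRECONDITION & SPEC =====
def Spec_build_memory_sections_py (memory_snapshot : List (String × List (String × List String))) (out : List String) : Prop := out = build_memory_sections_py_alt memory_snapshot
instance (memory_snapshot : List (String × List (String × List String))) (out : List String) : Decidable (Spec_build_memory_sections_py memory_snapshot out) := by unfold Spec_build_memory_sections_py; infer_instance

-- ===== CLAIM (what is proved, stated in full; the proofs are below) =====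
def Claim_equal_build_memory_sections_py : Prop := ∀ (memory_snapshot : List (String × List (String × List String))), Dom_build_memory_sections_py memory_snapshot → Spec_build_memory_sections_py memory_snapshot (build_memory_sections_py memory_snapshot)

-- ===== LEMMAS AND PROOFS =====

-- ===== VERDICT (by name: the statement is the Claim_ definition above) =====
theorem build_memory_sections_py_spec : Claim_equal_build_memory_sections_py := by
  intro ms _
  unfold Spec_build_memory_sections_py build_memory_sections_py build_memory_sections_py_alt
  by_cases hpp : normMem (pyDictGet ((pyDictGet ms "personal_memory").getD []) "preferences") = [] <;>
    by_cases hsr : normMem (pyDictGet ((pyDictGet ms "semantic_memory").getD []) "rules") = [] <;>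
    by_cases hsb : normMem (pyDictGet ((pyDictGet ms "semantic_memory").getD []) "boosts") = [] <;>
    by_cases hsp : normMem (pyDictGet ((pyDictGet ms "semantic_memory").getD []) "penalties") = [] <;>
    by_cases hee : normMem (pyDictGet ((pyDictGet ms "episodic_memory").getD []) "episodes") = [] <;>
    simp [sectionB, hpp, hsr, hsb, hsp, hee]
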